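-- pv_equiv track=rewrite | github.com/ucuapps/CoronaryArteryStenosisScoreClassification | prediction_pipeline/patient_data_structure.py | __map_mpr_name_to_record_name
-- ===== SOURCE A (Python) =====
-- def __map_mpr_name_to_record_name(mpr_name):
--     # ToDo handle PLB PLV branches
--     main_branches_dict = {
--         'LAD': ['LAD', 'LAD ', 'LAD Original', 'LAD original', 'LAD *', 'LAD*'],
--         'D-1':['LAD-D1 original', 'LAD-D1 Original', 'LAD-D1', 'LAD-D1 *', 'LAD -D1', 'LAD -D1', 'LAD - D1', 'D1'],
--         'D-2':['LAD-D2', 'LAD-D2 *', 'LAD-D2', '2LAD-D2', 'LAD -D2', 'LAD-D2 original', 'LAD -D2'],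
--         'D-3': ['LAD-D3', 'LAD-D3 *', 'LAD-D3', 'LAD-D3 original', ],
--         'D-4': [ 'LAD - D4 *', 'LAD-D4', 'LAD-D4 *'],
--         'RCA': ['RCA', 'RCA *', 'RCA*', 'RCA original'],
--         'OM':['OM*', 'LCX-OM  *', 'OM *', 'OM', 'LCX-OM*', 'LCX - OM *', 'LCX-OM original', 'LCX-OM *', 'LCX-OM', 'OM original'],
--         'OM-1': ['LCX-OM1 *', 'OM1 *', 'OM1', 'LCX-OM1', 'LCX -OM1 *', 'LCX-OM1*'],
--         'OM-2': ['LCX-OM2 *', 'OM2 *', 'LCX-OM2', 'LCX - OM2 *', 'LCX -OM2 *', 'OM2*', 'LCX-OM2*'],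
--         'OM-3': ['LCX-OM3 *', 'LCX -OM3 *', 'OM3',  'LCX-OM3*', 'LCX-OM3', 'OM3 *', 'OM3*'],
--         'OM-4': ['OM4 *', 'OM4', 'LCX-OM4 *'],
--         'LCX': ['LCX', 'LCX *', 'LCX original', 'LCX  *', 'LCX*'],
--         'PDA_RCA': ['RCA-PDA','RCA -PDA', 'RCA-PDA*', 'RCA-PDA *', 'RCA-PDA1','RCA-PDA2', 'RCA-PDA2 *','RCA-PDA2',
--                     'RCA-PDA2*'],
--         'PLV_RCA': ['RCA-PLB', 'RCA-PLB ', 'RCA-PLB', 'RCA -PLB*', 'RCA-PLB1 *','RCA-PLB1', 'RCA-PLB1 *','RCA-PLB2',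
--                     'RCA-PLB2 *'],
--         'PDA_LCX': ['LCX-PDA *', 'LCX-PDA', 'LCX-PDA2', 'LCX-PDA2 *'],
--         'PLV_LCX': ['LCX-PLB', 'LCX-PLB *', 'LCX-PLB1', 'LCX-PLB2',  'LCX-PLB2 *'],
--         'THRASH': ['PLB  *', 'PLB *', 'PLB original', 'PLB','PLB*','PLB1 *', 'PLB1*', 'PLB1','PLB2 *', 'PLB2*', 'PLB2']
--     }
--
--     for key in main_branches_dict:
--         if mpr_name in main_branches_dict[key]:
--             return key
-- ===== SOURCE B (Python) =====
-- def __map_mpr_name_to_record_name(mpr_name):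
--     # Precomputed inverted alias -> category table (first-owning key per alias),
--     # written out as a flat constant dict; a single hash lookup answers the query.
--     alias_to_key = {
--         'LAD': 'LAD',
--         'LAD ': 'LAD',
--         'LAD Original': 'LAD',
--         'LAD original': 'LAD',
--         'LAD *': 'LAD',
--         'LAD*': 'LAD',
--         'LAD-D1 original': 'D-1',
--         'LAD-D1 Original': 'D-1',
--         'LAD-D1': 'D-1',
--         'LAD-D1 *': 'D-1',
--         'LAD -D1': 'D-1',
--         'LAD - D1': 'D-1',
--         'D1': 'D-1',
--         'LAD-D2': 'D-2',
--         'LAD-D2 *': 'D-2',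
--         '2LAD-D2': 'D-2',
--         'LAD -D2': 'D-2',
--         'LAD-D2 original': 'D-2',
--         'LAD-D3': 'D-3',
--         'LAD-D3 *': 'D-3',
--         'LAD-D3 original': 'D-3',
--         'LAD - D4 *': 'D-4',
--         'LAD-D4': 'D-4',
--         'LAD-D4 *': 'D-4',
--         'RCA': 'RCA',
--         'RCA *': 'RCA',
--         'RCA*': 'RCA',
--         'RCA original': 'RCA',
--         'OM*': 'OM',
--         'LCX-OM  *': 'OM',
--         'OM *': 'OM',
--         'OM': 'OM',
--         'LCX-OM*': 'OM',
--         'LCX - OM *': 'OM',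
--         'LCX-OM original': 'OM',
--         'LCX-OM *': 'OM',
--         'LCX-OM': 'OM',
--         'OM original': 'OM',
--         'LCX-OM1 *': 'OM-1',
--         'OM1 *': 'OM-1',
--         'OM1': 'OM-1',
--         'LCX-OM1': 'OM-1',
--         'LCX -OM1 *': 'OM-1',
--         'LCX-OM1*': 'OM-1',
--         'LCX-OM2 *': 'OM-2',
--         'OM2 *': 'OM-2',
--         'LCX-OM2': 'OM-2',
--         'LCX - OM2 *': 'OM-2',
--         'LCX -OM2 *': 'OM-2',
--         'OM2*': 'OM-2',
--         'LCX-OM2*': 'OM-2',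
--         'LCX-OM3 *': 'OM-3',
--         'LCX -OM3 *': 'OM-3',
--         'OM3': 'OM-3',
--         'LCX-OM3*': 'OM-3',
--         'LCX-OM3': 'OM-3',
--         'OM3 *': 'OM-3',
--         'OM3*': 'OM-3',
--         'OM4 *': 'OM-4',
--         'OM4': 'OM-4',
--         'LCX-OM4 *': 'OM-4',
--         'LCX': 'LCX',
--         'LCX *': 'LCX',
--         'LCX original': 'LCX',
--         'LCX  *': 'LCX',
--         'LCX*': 'LCX',
--         'RCA-PDA': 'PDA_RCA',
--         'RCA -PDA': 'PDA_RCA',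
--         'RCA-PDA*': 'PDA_RCA',
--         'RCA-PDA *': 'PDA_RCA',
--         'RCA-PDA1': 'PDA_RCA',
--         'RCA-PDA2': 'PDA_RCA',
--         'RCA-PDA2 *': 'PDA_RCA',
--         'RCA-PDA2*': 'PDA_RCA',
--         'RCA-PLB': 'PLV_RCA',
--         'RCA-PLB ': 'PLV_RCA',
--         'RCA -PLB*': 'PLV_RCA',
--         'RCA-PLB1 *': 'PLV_RCA',
--         'RCA-PLB1': 'PLV_RCA',
--         'RCA-PLB2': 'PLV_RCA',
--         'RCA-PLB2 *': 'PLV_RCA',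
--         'LCX-PDA *': 'PDA_LCX',
--         'LCX-PDA': 'PDA_LCX',
--         'LCX-PDA2': 'PDA_LCX',
--         'LCX-PDA2 *': 'PDA_LCX',
--         'LCX-PLB': 'PLV_LCX',
--         'LCX-PLB *': 'PLV_LCX',
--         'LCX-PLB1': 'PLV_LCX',
--         'LCX-PLB2': 'PLV_LCX',
--         'LCX-PLB2 *': 'PLV_LCX',
--         'PLB  *': 'THRASH',
--         'PLB *': 'THRASH',
--         'PLB original': 'THRASH',
--         'PLB': 'THRASH',
--         'PLB*': 'THRASH',
--         'PLB1 *': 'THRASH',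
--         'PLB1*': 'THRASH',
--         'PLB1': 'THRASH',
--         'PLB2 *': 'THRASH',
--         'PLB2*': 'THRASH',
--         'PLB2': 'THRASH',
--     }
--     return alias_to_key.get(mpr_name)
-- ===== Notes on version B (the rewrite author's own statement) =====
-- stated objective: idiomatic
-- what changed: B replaces A's grouped table plus per-key membership-scan loop with a flat precomputed alias->category constant dict (first-owning key per alias, duplicates already resolved) answered by a single alias_to_key.get(mpr_name), which returns None on a miss exactly as A's fall-through does.
import Mathlib
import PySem

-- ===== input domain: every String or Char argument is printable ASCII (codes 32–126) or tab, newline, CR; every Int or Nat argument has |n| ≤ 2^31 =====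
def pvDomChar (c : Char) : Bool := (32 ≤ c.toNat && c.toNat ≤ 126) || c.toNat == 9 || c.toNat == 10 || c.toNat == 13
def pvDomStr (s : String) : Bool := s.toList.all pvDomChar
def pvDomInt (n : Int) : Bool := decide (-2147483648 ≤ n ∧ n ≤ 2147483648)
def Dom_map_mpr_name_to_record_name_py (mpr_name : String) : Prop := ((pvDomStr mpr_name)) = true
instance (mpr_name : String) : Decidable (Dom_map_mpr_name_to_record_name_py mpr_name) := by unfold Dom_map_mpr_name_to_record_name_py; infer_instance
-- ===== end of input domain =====

-- B replaces A's per-key membership-scan loop over a grouped table by a flat precomputed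
-- alias->category constant dict and a single lookup; objective: idiomatic.


-- ===== PORT A =====
-- the dict literal main_branches_dict, as an association list in insertion order (keys distinct)
def pvMainBranches : List (String × List String) := [
  ("LAD", ["LAD", "LAD ", "LAD Original", "LAD original", "LAD *", "LAD*"]),
  ("D-1", ["LAD-D1 original", "LAD-D1 Original", "LAD-D1", "LAD-D1 *", "LAD -D1", "LAD -D1", "LAD - D1", "D1"]),
  ("D-2", ["LAD-D2", "LAD-D2 *", "LAD-D2", "2LAD-D2", "LAD -D2", "LAD-D2 original", "LAD -D2"]),
  ("D-3", ["LAD-D3", "LAD-D3 *", "LAD-D3", "LAD-D3 original"]),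
  ("D-4", ["LAD - D4 *", "LAD-D4", "LAD-D4 *"]),
  ("RCA", ["RCA", "RCA *", "RCA*", "RCA original"]),
  ("OM", ["OM*", "LCX-OM  *", "OM *", "OM", "LCX-OM*", "LCX - OM *", "LCX-OM original", "LCX-OM *", "LCX-OM", "OM original"]),
  ("OM-1", ["LCX-OM1 *", "OM1 *", "OM1", "LCX-OM1", "LCX -OM1 *", "LCX-OM1*"]),
  ("OM-2", ["LCX-OM2 *", "OM2 *", "LCX-OM2", "LCX - OM2 *", "LCX -OM2 *", "OM2*", "LCX-OM2*"]),
  ("OM-3", ["LCX-OM3 *", "LCX -OM3 *", "OM3", "LCX-OM3*", "LCX-OM3", "OM3 *", "OM3*"]),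
  ("OM-4", ["OM4 *", "OM4", "LCX-OM4 *"]),
  ("LCX", ["LCX", "LCX *", "LCX original", "LCX  *", "LCX*"]),
  ("PDA_RCA", ["RCA-PDA", "RCA -PDA", "RCA-PDA*", "RCA-PDA *", "RCA-PDA1", "RCA-PDA2", "RCA-PDA2 *", "RCA-PDA2", "RCA-PDA2*"]),
  ("PLV_RCA", ["RCA-PLB", "RCA-PLB ", "RCA-PLB", "RCA -PLB*", "RCA-PLB1 *", "RCA-PLB1", "RCA-PLB1 *", "RCA-PLB2", "RCA-PLB2 *"]),
  ("PDA_LCX", ["LCX-PDA *", "LCX-PDA", "LCX-PDA2", "LCX-PDA2 *"]),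
  ("PLV_LCX", ["LCX-PLB", "LCX-PLB *", "LCX-PLB1", "LCX-PLB2", "LCX-PLB2 *"]),
  ("THRASH", ["PLB  *", "PLB *", "PLB original", "PLB", "PLB*", "PLB1 *", "PLB1*", "PLB1", "PLB2 *", "PLB2*", "PLB2"])
]

-- A: 'for key in main_branches_dict: if mpr_name in main_branches_dict[key]: return key'
-- (falling through returns None): recursion over the keys, a membership scan per key
def pvFindKey (g : List (String × List String)) (s : String) : Option String :=
  match g with
  | [] => none
  | (k, v) :: rest => if v.contains s then some k else pvFindKey rest s

def map_mpr_name_to_record_name_py (mpr_name : String) : Option String :=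
  pvFindKey pvMainBranches mpr_name

-- ===== PORT B =====
-- B: the flat constant dict literal alias_to_key (alias -> first owning category), one .get
def pvAliasTable : PySem.Dict String String := PySem.Dict.mk [
  ("LAD", "LAD"),
  ("LAD ", "LAD"),
  ("LAD Original", "LAD"),
  ("LAD original", "LAD"),
  ("LAD *", "LAD"),
  ("LAD*", "LAD"),
  ("LAD-D1 original", "D-1"),
  ("LAD-D1 Original", "D-1"),
  ("LAD-D1", "D-1"),
  ("LAD-D1 *", "D-1"),
  ("LAD -D1", "D-1"),
  ("LAD - D1", "D-1"),
  ("D1", "D-1"),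
  ("LAD-D2", "D-2"),
  ("LAD-D2 *", "D-2"),
  ("2LAD-D2", "D-2"),
  ("LAD -D2", "D-2"),
  ("LAD-D2 original", "D-2"),
  ("LAD-D3", "D-3"),
  ("LAD-D3 *", "D-3"),
  ("LAD-D3 original", "D-3"),
  ("LAD - D4 *", "D-4"),
  ("LAD-D4", "D-4"),
  ("LAD-D4 *", "D-4"),
  ("RCA", "RCA"),
  ("RCA *", "RCA"),
  ("RCA*", "RCA"),
  ("RCA original", "RCA"),
  ("OM*", "OM"),
  ("LCX-OM  *", "OM"),
  ("OM *", "OM"),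
  ("OM", "OM"),
  ("LCX-OM*", "OM"),
  ("LCX - OM *", "OM"),
  ("LCX-OM original", "OM"),
  ("LCX-OM *", "OM"),
  ("LCX-OM", "OM"),
  ("OM original", "OM"),
  ("LCX-OM1 *", "OM-1"),
  ("OM1 *", "OM-1"),
  ("OM1", "OM-1"),
  ("LCX-OM1", "OM-1"),
  ("LCX -OM1 *", "OM-1"),
  ("LCX-OM1*", "OM-1"),
  ("LCX-OM2 *", "OM-2"),
  ("OM2 *", "OM-2"),
  ("LCX-OM2", "OM-2"),
  ("LCX - OM2 *", "OM-2"),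
  ("LCX -OM2 *", "OM-2"),
  ("OM2*", "OM-2"),
  ("LCX-OM2*", "OM-2"),
  ("LCX-OM3 *", "OM-3"),
  ("LCX -OM3 *", "OM-3"),
  ("OM3", "OM-3"),
  ("LCX-OM3*", "OM-3"),
  ("LCX-OM3", "OM-3"),
  ("OM3 *", "OM-3"),
  ("OM3*", "OM-3"),
  ("OM4 *", "OM-4"),
  ("OM4", "OM-4"),
  ("LCX-OM4 *", "OM-4"),
  ("LCX", "LCX"),
  ("LCX *", "LCX"),
  ("LCX original", "LCX"),
  ("LCX  *", "LCX"),
  ("LCX*", "LCX"),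
  ("RCA-PDA", "PDA_RCA"),
  ("RCA -PDA", "PDA_RCA"),
  ("RCA-PDA*", "PDA_RCA"),
  ("RCA-PDA *", "PDA_RCA"),
  ("RCA-PDA1", "PDA_RCA"),
  ("RCA-PDA2", "PDA_RCA"),
  ("RCA-PDA2 *", "PDA_RCA"),
  ("RCA-PDA2*", "PDA_RCA"),
  ("RCA-PLB", "PLV_RCA"),
  ("RCA-PLB ", "PLV_RCA"),
  ("RCA -PLB*", "PLV_RCA"),
  ("RCA-PLB1 *", "PLV_RCA"),
  ("RCA-PLB1", "PLV_RCA"),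
  ("RCA-PLB2", "PLV_RCA"),
  ("RCA-PLB2 *", "PLV_RCA"),
  ("LCX-PDA *", "PDA_LCX"),
  ("LCX-PDA", "PDA_LCX"),
  ("LCX-PDA2", "PDA_LCX"),
  ("LCX-PDA2 *", "PDA_LCX"),
  ("LCX-PLB", "PLV_LCX"),
  ("LCX-PLB *", "PLV_LCX"),
  ("LCX-PLB1", "PLV_LCX"),
  ("LCX-PLB2", "PLV_LCX"),
  ("LCX-PLB2 *", "PLV_LCX"),
  ("PLB  *", "THRASH"),
  ("PLB *", "THRASH"),
  ("PLB original", "THRASH"),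
  ("PLB", "THRASH"),
  ("PLB*", "THRASH"),
  ("PLB1 *", "THRASH"),
  ("PLB1*", "THRASH"),
  ("PLB1", "THRASH"),
  ("PLB2 *", "THRASH"),
  ("PLB2*", "THRASH"),
  ("PLB2", "THRASH")
]

def map_mpr_name_to_record_name_py_alt (mpr_name : String) : Option String :=
  pvAliasTable.get? mpr_name

-- ===== PRECONDITION & SPEC =====
def Spec_map_mpr_name_to_record_name_py (mpr_name : String) (out : Option String) : Prop := out = map_mpr_name_to_record_name_py_alt mpr_name
instance (mpr_name : String) (out : Option String) : Decidable (Spec_map_mpr_name_to_record_name_py mpr_name out) := by unfold Spec_map_mpr_name_to_record_name_py; infer_instance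

-- ===== CLAIM (what is proved, stated in full; the proofs are below) =====
def Claim_equal_map_mpr_name_to_record_name_py : Prop := ∀ (mpr_name : String), Dom_map_mpr_name_to_record_name_py mpr_name → Spec_map_mpr_name_to_record_name_py mpr_name (map_mpr_name_to_record_name_py mpr_name)

-- ===== LEMMAS AND PROOFS =====

-- flatten A's grouped table into (alias, key) pairs, in A's scan order (duplicates kept)
def pvFlatten (g : List (String × List String)) : List (String × String) :=
  g.flatMap (fun kv => kv.2.map (fun a => (a, kv.1)))

-- drop every pair whose alias already occurred earlier (first occurrence wins)
def pvDedup (seen : List String) : List (String × String) → List (String × String)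
  | [] => []
  | p :: r => if p.1 ∈ seen then pvDedup seen r else p :: pvDedup (p.1 :: seen) r

lemma pv_get_map_append (v : List String) (k : String) (rest : List (String × String)) (s : String) :
    (PySem.Dict.mk (v.map (fun a => (a, k)) ++ rest)).get? s
      = if v.contains s then some k else (PySem.Dict.mk rest).get? s := by
  induction v with
  | nil => simp
  | cons a v ih =>
    simp only [List.map_cons, List.cons_append, PySem.Dict.get?_mk_cons, ih, List.contains_cons]
    by_cases h : a = s
    · subst h; simp
    · simp [h, Ne.symm h]

-- A's scan over the grouped table = first-match lookup in the flattened pair list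
lemma pv_findKey_eq_flatten (g : List (String × List String)) (s : String) :
    pvFindKey g s = (PySem.Dict.mk (pvFlatten g)).get? s := by
  induction g with
  | nil => simp [pvFindKey, pvFlatten, PySem.Dict.get?]
  | cons kv g ih =>
    simp only [pvFindKey, pvFlatten, List.flatMap_cons, pv_get_map_append]
    by_cases h : kv.2.contains s <;> simp [ih, pvFlatten]

-- first-match lookup ignores later duplicate keys
lemma pv_get_dedup (l : List (String × String)) (seen : List String) (s : String)
    (hs : s ∉ seen) :
    (PySem.Dict.mk (pvDedup seen l)).get? s = (PySem.Dict.mk l).get? s := by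
  induction l generalizing seen with
  | nil => simp [pvDedup]
  | cons p l ih =>
    simp only [pvDedup]
    by_cases hp : p.1 ∈ seen
    · have hne : ¬ (p.1 = s) := fun h => hs (h ▸ hp)
      simp only [hp, if_true]
      rw [ih seen hs]
      cases p with
      | mk a b => simp only [PySem.Dict.get?_mk_cons]
                  simp_all [beq_iff_eq]
    · simp only [hp, if_false]
      cases p with
      | mk a b =>
        simp only [PySem.Dict.get?_mk_cons]
        by_cases h : a = s
        · simp [h]
        · have hs' : s ∉ a :: seen := by
            simp only [List.mem_cons]
            rintro (rfl | hmem)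
            · exact h rfl
            · exact hs hmem
          simp only [beq_iff_eq, h, if_false]
          exact ih (a :: seen) hs'

-- B's flat literal IS the dedup of A's flattened table (checked by kernel computation)
set_option maxRecDepth 40000 in
lemma pv_table_eq : pvAliasTable = PySem.Dict.mk (pvDedup [] (pvFlatten pvMainBranches)) := by
  rfl

-- ===== VERDICT (by name: the statement is the Claim_ definition above) =====
theorem map_mpr_name_to_record_name_py_spec : Claim_equal_map_mpr_name_to_record_name_py := by
  intro s _
  unfold Spec_map_mpr_name_to_record_name_py map_mpr_name_to_record_name_py map_mpr_name_to_record_name_py_alt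
  rw [pv_findKey_eq_flatten, pv_table_eq, pv_get_dedup _ _ _ (by simp)]
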